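-- pv_equiv track=rewrite | github.com/kayceenguyenn/semeval26-task13 | src/features/kaycee_ast.py | count_comments
-- ===== SOURCE A (Python) =====
-- def count_comments(code: str) -> int:
--     """
--     Count the number of comment blocks in code.
--     Groups consecutive comment lines into a single comment block.
--
--     Args:
--         code: Source code string
--
--     Returns:
--         int: Number of comment blocks
--     """
--     lines = code.split('\n')
--     comment_count = 0
--     in_comment_block = False
--
--     for line in lines:
--         is_comment_line = line.strip().startswith('#')
--         if is_comment_line and not in_comment_block:
--             comment_count += 1
--             in_comment_block = True
--         elif not is_comment_line:
--             # End of comment block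
--             in_comment_block = False
--
--     return comment_count
-- ===== SOURCE B (Python) =====
-- def count_comments(code: str) -> int:
--     lines = code.split('\n')
--     n = len(lines)
--     blocks = 0
--     i = 0
--     while i < n:
--         # advance to the next comment line
--         while i < n and not lines[i].strip().startswith('#'):
--             i += 1
--         if i < n:
--             blocks += 1
--             # consume the whole maximal run of comment lines as one block
--             while i < n and lines[i].strip().startswith('#'):
--                 i += 1
--     return blocks
-- ===== Notes on version B (the rewrite author's own statement) =====
-- stated objective: alternative
-- what changed: B replaces A's single pass with a carried in_comment_block flag and per-line transition branching by a run-consuming scan: an outer loop that alternately skips a maximal run of non-comment lines and then consumes a maximal run of comment lines, counting one block per consumed run, with no state carried between lines.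
import Mathlib
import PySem

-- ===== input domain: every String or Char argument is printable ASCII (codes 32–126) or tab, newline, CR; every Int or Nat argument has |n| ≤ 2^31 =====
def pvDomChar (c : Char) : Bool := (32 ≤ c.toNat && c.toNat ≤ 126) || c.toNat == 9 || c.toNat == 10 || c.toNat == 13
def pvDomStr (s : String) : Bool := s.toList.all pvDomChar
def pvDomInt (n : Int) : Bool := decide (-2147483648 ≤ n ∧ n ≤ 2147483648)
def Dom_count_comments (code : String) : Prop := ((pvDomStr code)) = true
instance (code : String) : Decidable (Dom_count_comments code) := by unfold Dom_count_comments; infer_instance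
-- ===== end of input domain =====

-- B replaces A's carried in_comment_block flag by a run-consuming scan: it alternately
-- skips a maximal run of non-comment lines and consumes a maximal run of comment lines,
-- counting one block per run (objective: alternative, same O(n) cost).

-- ===== PORT A =====
-- line.strip().startswith('#')
def pvIsComment (line : String) : Bool :=
  PySem.Str.startswith (PySem.Str.strip line) "#"

-- the loop over lines carrying (comment_count, in_comment_block)
def pvLoopA (st : Int × Bool) (line : String) : Int × Bool :=
  let isC := pvIsComment line
  if isC && !st.2 then (st.1 + 1, true)
  else if !isC then (st.1, false)
  else st

def count_comments (code : String) : Int :=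
  let lines := (PySem.Str.split? code "\n").getD []   -- sep ≠ "" ⇒ split? is always some
  (lines.foldl pvLoopA (0, false)).1

-- ===== PORT B =====
-- Source B's outer while over the index i, transcribed as recursion on the suffix lines[i:]:
-- pvSeek = the inner "advance to the next comment line" phase, pvSkip = the
-- "consume the whole maximal run of comment lines" phase (blocks += 1 at the phase switch).
mutual
def pvSeek : List String → Int
  | [] => 0
  | l :: ls => if pvIsComment l then 1 + pvSkip ls else pvSeek ls
def pvSkip : List String → Int
  | [] => 0
  | l :: ls => if pvIsComment l then pvSkip ls else pvSeek ls
end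

def count_comments_alt (code : String) : Int :=
  pvSeek ((PySem.Str.split? code "\n").getD [])

-- ===== PRECONDITION & SPEC =====
def Spec_count_comments (code : String) (out : Int) : Prop := out = count_comments_alt code
instance (code : String) (out : Int) : Decidable (Spec_count_comments code out) := by unfold Spec_count_comments; infer_instance

-- ===== CLAIM (what is proved, stated in full; the proofs are below) =====
def Claim_equal_count_comments : Prop := ∀ (code : String), Dom_count_comments code → Spec_count_comments code (count_comments code)

-- ===== LEMMAS AND PROOFS =====

-- A's fold started with flag b computes c + (pvSeek / pvSkip) of the remaining lines
theorem pvLoopA_phases (ls : List String) (c : Int) :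
    (ls.foldl pvLoopA (c, false)).1 = c + pvSeek ls ∧
    (ls.foldl pvLoopA (c, true)).1 = c + pvSkip ls := by
  induction ls generalizing c with
  | nil => simp [pvSeek, pvSkip]
  | cons l ls ih =>
    simp only [List.foldl_cons, pvLoopA, pvSeek, pvSkip]
    cases h : pvIsComment l <;>
      simp [h, (ih c).1, (ih c).2, (ih (c + 1)).2] <;> ring

-- ===== VERDICT (by name: the statement is the Claim_ definition above) =====
theorem count_comments_spec : Claim_equal_count_comments := by
  intro code _
  unfold Spec_count_comments count_comments count_comments_alt
  simpa using (pvLoopA_phases ((PySem.Str.split? code "\n").getD []) 0).1
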